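/- PORTED by tools/port_fixed.py from Prog/Jsmn/S/StrTok.lean to THE FIXED IMAGE fixed/jsmn_s.bin (same bytes at the same addresses; binFS). Do not edit: edit the original and port again. -/
/-
  jsmn_s.bin, `jsmn_parse_string`: after `call jsmn_alloc_token` (100187H; the token pointer goes to r12) — NULL → JSMN_ERROR_NOMEM, `pos = start`;
  otherwise `jsmn_fill_token(token, JSMN_STRING, start + 1, pos)` through its contract, `token->parent = parser->toksuper` (the parent link of this
  configuration: a 4-byte store at r12 + 10H) and `return 0`.
    alloc_null    100187H, rax = NULL → 1001CAH                                        (3 + 3 instructions)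
    parent_ret    1001A1H (after `call jsmn_fill_token`) → 1001CAH                     (4)
    alloc_some    100187H, rax = &tokens[i] → call jsmn_fill_token → parent_ret        (8 + the callee)
-/
import Prog.Jsmn.Fixed.Specs
import Prog.Jsmn.Fixed.CodeFS
import Prog.Jsmn.Fixed.S.StrInv
namespace X86
namespace J6
namespace FS
namespace Str
open X86.User (CodeAt RegsKept Span FlagsOK Layout toNat_add_ofNat toNat_ofNat_lt' add_ofNat_add)
open Jsmn JsmnFSBytes

set_option maxRecDepth 100000
set_option maxHeartbeats 4000000
set_option linter.unusedSimpArgs false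
set_option linter.unusedVariables false

variable {c : SCtx} {n : User.Layout} {v0 v : User.State}

/-- `start + 1` converted to `int`, as the 32-bit pattern handed to jsmn_fill_token. -/
theorem u32_i32_succ (x : Nat) : u32 (i32 (i32 (x : Int) + 1)) = (x + 1) % 4294967296 := by unfold u32 i32; omega
/-- `parser->pos` converted to `int`, as a 32-bit pattern. -/
theorem u32_i32_nat (x : Nat) : u32 (i32 (x : Int)) = x % 4294967296 := by unfold u32 i32; omega

/-- 100187H with rax = NULL: `parser->pos = start; return JSMN_ERROR_NOMEM`. -/
theorem alloc_null (he : Entry c n v0) {q : Nat} {ts0 ts : Tokens} (hrip : v.rip = 0x100187) (hs : c.toks = some ts0)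
    (hf_core : Core c n v0 v { c.p with pos := q } (some ts))
    (hrax : v.reg .rax = 0) (hrbx : v.reg .rbx = c.pa) (hrbp : v.reg .rbp = UInt64.ofNat c.p.pos) :
    Reach n v (fun v' => AtRet c n v0 v' JSMN_ERROR_NOMEM c.p (some ts)) := by
  obtain ⟨hp, hr8⟩ := he
  have hp' := hp
  rw [hs] at hp'
  have hR := hp'.toksRegion
  v3_open hp hf_core hR
  j6f_bin
  strs_some_f
  have hpos : c.p.pos < 2 ^ 32 := hp_parser_pos ▸ User.Mem.readLE4_lt _ _
  have hlowp := Word.low32_ofNat_of_lt (n := c.p.pos) hpos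
  v3_walk hf_core_code hp.call.fetch [hlowp] until [0x1001ca]
  refine Reach.done ⟨by simp, ⟨by (v3_regnorm; exact hf_core_rsp), by v3_kept, by v3_frame hf_core_sv12, by v3_frame hf_core_svbp, by v3_frame hf_core_svbx,
      by v3_frame hf_core_retA, by (simp only [dataWins, SCtx.tlen, hs, toksBytes, tokSize_strictLinks]; v3_same), by v3_frame hf_core_code,
      ⟨by v3_read, by v3_frame hf_core_parser_toknext, by v3_frame hf_core_parser_toksuper⟩, ⟨htb0, htslen, by v3_frame htoks⟩⟩,
    by (v3_regnorm; exact u32_nomem.symm)⟩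

/-- 1001A1H (after `call jsmn_fill_token`, r12 = `&tokens[i]`): `token->parent = parser->toksuper; return 0`. -/
theorem parent_ret (he : Entry c n v0) {pp : Parser} {ts0 ts2 : Tokens} {i : Nat} (hrip : v.rip = 0x1001a1) (hs : c.toks = some ts0)
    (hf_core : Core c n v0 v pp (some ts2)) (hrbx : v.reg .rbx = c.pa) (hr12 : v.reg .r12 = tokAddr Config.strictLinks c.tb i)
    (hi : i < c.numTokens) :
    Reach n v (fun v' => AtRet c n v0 v' 0 pp (some (ts2.set i { ts2.getD i default with parent := pp.toksuper }))) := by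
  obtain ⟨hp, hr8⟩ := he
  have hp' := hp
  rw [hs] at hp'
  have hR := hp'.toksRegion
  v3_open hp hf_core hR
  j6f_bin
  strs_some_f
  have hsup0 := hf_core_parser_toksuper
  obtain ⟨hsup, hsup1, hsup2⟩ := hf_core_parser_toksuper
  have hsuplt := u32_lt pp.toksuper
  have haddr : tokAddr Config.strictLinks c.tb i = c.tb + UInt64.ofNat (20 * i) := by unfold tokAddr; rw [tokSize_strictLinks]
  rw [haddr] at hr12
  have hi2 : i < ts2.length := htslen ▸ hi
  have hmul := tokSize_mul_le Config.strictLinks hi2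
  rw [tokSize_strictLinks, htslen] at hmul
  v3_walk hf_core_code hp.call.fetch [] until [0x1001ca]
  have hraw : (Word.low .w32 (UInt64.ofNat (u32 pp.toksuper))).toNat = u32 pp.toksuper := by v3_omega
  rw [hraw]
  have ht0 := htoks.getD i hi2
  rw [haddr] at ht0
  have ht0t := ht0.type
  have ht0s := ht0.start
  have ht0e := ht0.«end»
  have ht0z := ht0.size
  refine Reach.done ⟨by simp, ⟨by (v3_regnorm; exact hf_core_rsp), by v3_kept, by v3_frame hf_core_sv12, by v3_frame hf_core_svbp, by v3_frame hf_core_svbx,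
      by v3_frame hf_core_retA, by (simp only [dataWins, SCtx.tlen, hs, toksBytes, tokSize_strictLinks]; v3_same), by v3_frame hf_core_code,
      ⟨by v3_frame hf_core_parser_pos, by v3_frame hf_core_parser_toknext, by v3_frame hsup0⟩,
      ⟨htb0, by rw [List.length_set]; exact htslen, ?_⟩⟩, by (v3_regnorm; rfl)⟩
  v3_memnorm
  refine TokensAt.update htoks hi2 (by rw [tokSize_strictLinks, htslen]; v3_omega) (by rw [tokSize_strictLinks]; v3_eqon)
    (by rw [tokSize_strictLinks, htslen]; v3_eqon) ?_
  rw [haddr]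
  exact ⟨by v3_frame ht0t, by v3_frame ht0s, by v3_frame ht0e, by v3_frame ht0z, fun _ => holds32_read (by v3_read) ⟨rfl, hsup1, hsup2⟩⟩

/-- 100187H with rax = &tokens[i]: `jsmn_fill_token(token, JSMN_STRING, start + 1, parser->pos)`, the parent link, `return 0`. -/
theorem alloc_some (hfill : FillSpec binFS n) (he : Entry c n v0) {q i : Nat} {pp : Parser} {ts0 ts : Tokens} (hrip : v.rip = 0x100187)
    (hs : c.toks = some ts0) (hf_core : Core c n v0 v pp (some ts)) (hq : pp.pos = q) (hi : i < c.numTokens)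
    (hrax : v.reg .rax = tokAddr Config.strictLinks c.tb i) (hrbx : v.reg .rbx = c.pa) (hrbp : v.reg .rbp = UInt64.ofNat c.p.pos) :
    Reach n v (fun v' => AtRet c n v0 v' 0 pp
      (some ((ts.set i (fillToken (ts.getD i default) JSMN_STRING (i32 (i32 c.p.pos + 1)) (i32 q))).set i
        { (ts.set i (fillToken (ts.getD i default) JSMN_STRING (i32 (i32 c.p.pos + 1)) (i32 q))).getD i default with parent := pp.toksuper }))) := by
  obtain ⟨hp, hr8⟩ := he
  have hp' := hp
  rw [hs] at hp'
  have hR := hp'.toksRegion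
  v3_open hp hf_core hR
  j6f_bin
  strs_some_f
  have hpos : c.p.pos < 2 ^ 32 := hp_parser_pos ▸ User.Mem.readLE4_lt _ _
  have hq32 : pp.pos < 2 ^ 32 := hf_core_parser_pos ▸ User.Mem.readLE4_lt _ _
  have hlowp := Word.low32_ofNat_of_lt (n := c.p.pos) hpos
  have hmul := tokSize_mul_le Config.strictLinks hi
  rw [tokSize_strictLinks] at hmul
  have haddr : tokAddr Config.strictLinks c.tb i = c.tb + UInt64.ofNat (20 * i) := by unfold tokAddr; rw [tokSize_strictLinks]
  rw [haddr] at hrax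
  have himg : CodeAt v.mem 0x100000 binFS.image := by v3_frame hp.call.img
  v3_walk hf_core_code hp.call.fetch [hlowp] until [0x1001ca]
  -- right after `call jsmn_fill_token`
  have hu1 : Word.low .w32 (Word.low .w32 (UInt64.ofNat c.p.pos + 1)) = UInt64.ofNat (u32 (i32 (i32 (c.p.pos : Int) + 1))) := by
    rw [u32_i32_succ]; v3_omega
  have hu2 : Word.low .w32 (Word.low .w32 (UInt64.ofNat pp.pos)) = UInt64.ofNat (u32 (i32 (q : Int))) := by
    rw [← hq, u32_i32_nat]; v3_omega
  refine Reach.trans (hfill _ 0x1001a1 c.tb ts i JSMN_STRING (i32 (i32 (c.p.pos : Int) + 1)) (i32 (q : Int)) ?pre) ?_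
  case pre =>
    refine ⟨by show CallPre n 0x100000 binFS.image 0x10007e 0 0x1001a1 _; v3_callpre himg hp.call,
      by show _ = tokAddr Config.strictLinks _ _; rw [haddr]; v3_regnorm, by v3_regnorm; rfl, by v3_regnorm; exact hu1, by v3_regnorm; exact hu2, by decide,
      i32_range _, i32_range _, htslen ▸ hi, by show TokensAt Config.strictLinks _ _ _; v3_frame htoks, ⟨hR_lo, ?_, ?_, ?_⟩⟩
    all_goals j6f_bin
    all_goals first | v3_omega | (v3_regnorm; v3_omega)
  intro v1 hpost
  obtain ⟨hpost1, hres⟩ := hpost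
  v3_open hpost1
  have hk := hpost1.kept
  v3_viewnorm [X86.J6.dataWins, X86.J6.binFS_cfg, X86.J6.tokSize_strictLinks, X86.J6.links_strictLinks] at hpost1_rsp hpost1_same hres
  have hlen' : (ts.set i (fillToken (ts.getD i default) JSMN_STRING (i32 (i32 (c.p.pos : Int) + 1)) (i32 (q : Int)))).length = c.numTokens := by
    rw [List.length_set]; exact htslen
  refine parent_ret ⟨hp, hr8⟩ hpost1_rip hs ⟨hpost1_rsp, RegsKept.trans (by v3_kept) (hk.mono (by v3_regs_sub)),
    by v3_frame hf_core_sv12, by v3_frame hf_core_svbp, by v3_frame hf_core_svbx, by v3_frame hf_core_retA,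
    by (simp only [dataWins, SCtx.tlen, hs, toksBytes, tokSize_strictLinks]; v3_same), by v3_frame hcodeW,
    by v3_frame hf_core.parser, ⟨htb0, hlen', hres⟩⟩ (by rw [hk.get .rbx rfl]; v3_regnorm; exact hrbx)
    (by rw [hk.get .r12 rfl]; v3_regnorm; exact haddr.symm) hi

end Str
end FS
end J6
end X86
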